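-- pv_equiv track=rewrite | github.com/g1486352323-afk/SAIPN | pheme/pheme/simple_gen_vectors_tags.py | process_tags_text
-- ===== SOURCE A (Python) =====
-- def process_tags_text(text: str) -> str:
--     """处理Tags列的文本，确保可以向量化"""
--     if not isinstance(text, str) or not text.strip():
--         return "unknown"
--
--     # 如果是逗号分隔的标签列表，连接成句子
--     if ',' in text:
--         tags = [tag.strip() for tag in text.split(',') if tag.strip()]
--         # 过滤掉过短的标签
--         tags = [tag for tag in tags if len(tag) > 1]
--         if tags:
--             return ' '.join(tags)
--         else:
--             return "unknown"
--     else: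
--         # 单个标签
--         return text.strip() if len(text.strip()) > 1 else "unknown"
-- ===== SOURCE B (Python) =====
-- def process_tags_text(text: str) -> str:
--     """处理Tags列的文本，确保可以向量化"""
--     if not isinstance(text, str):
--         return "unknown"
--     res = ""
--     cur = ""
--     for ch in text + ',':
--         if ch == ',':
--             tag = cur.strip()
--             if len(tag) > 1:
--                 res = res + ' ' + tag if res else tag
--             cur = ""
--         else:
--             cur = cur + ch
--     return res if res else "unknown"
-- ===== Notes on version B (the rewrite author's own statement) =====
-- stated objective: alternative
-- what changed: Replaces A's staged pipeline (split on ',', list comprehensions to strip and filter, ' '.join, plus a separate single-tag branch) by one streaming character loop with a (result, current-token) accumulator that flushes the current token at each comma and at the end, appending it to the output string if its stripped form is longer than one character.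
import Mathlib
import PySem

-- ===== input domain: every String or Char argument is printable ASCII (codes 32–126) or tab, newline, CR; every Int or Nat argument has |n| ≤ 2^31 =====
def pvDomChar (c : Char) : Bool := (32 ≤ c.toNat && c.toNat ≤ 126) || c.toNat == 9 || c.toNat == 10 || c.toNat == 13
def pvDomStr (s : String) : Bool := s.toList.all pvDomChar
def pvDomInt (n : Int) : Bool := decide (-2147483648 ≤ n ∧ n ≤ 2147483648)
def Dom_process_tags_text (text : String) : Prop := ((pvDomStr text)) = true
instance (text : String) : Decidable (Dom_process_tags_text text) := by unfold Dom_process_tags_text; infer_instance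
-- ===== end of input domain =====

-- B replaces A's staged split/strip/filter/join with two branches by ONE streaming
-- pass over the characters with a (result, current-token) accumulator; objective: alternative.

-- ===== PORT A =====
def process_tags_text (text : String) : String :=
  if PySem.Str.strip text = "" then "unknown"
  else if PySem.Str.isIn "," text then
    -- tags = [tag.strip() for tag in text.split(',') if tag.strip()]
    let tags := (((PySem.Str.split? text ",").getD []).filter
        (fun tag => PySem.Str.strip tag ≠ "")).map (fun tag => PySem.Str.strip tag)
    -- tags = [tag for tag in tags if len(tag) > 1]
    let tags := tags.filter (fun tag => 1 < PySem.Str.len tag)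
    if tags ≠ [] then PySem.Str.join " " tags else "unknown"
  else
    if 1 < PySem.Str.len (PySem.Str.strip text) then PySem.Str.strip text else "unknown"

-- ===== PORT B =====
-- the body of the `if ch == ','` flush: strip the current token, append it if long enough
def pvFlush (res cur : List Char) : List Char :=
  let tag := PySem.Chars.strip cur
  if 1 < tag.length then (if res = [] then tag else res ++ ' ' :: tag) else res

-- one step of the character loop (strings carried as their character lists)
def pvStep (st : List Char × List Char) (ch : Char) : List Char × List Char :=
  if ch = ',' then (pvFlush st.1 st.2, []) else (st.1, st.2 ++ [ch])

def process_tags_text_alt (text : String) : String :=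
  let res := ((text.toList ++ [',']).foldl pvStep ([], [])).1
  if res = [] then "unknown" else String.ofList res

-- ===== PRECONDITION & SPEC =====
def Spec_process_tags_text (text : String) (out : String) : Prop := out = process_tags_text_alt text
instance (text : String) (out : String) : Decidable (Spec_process_tags_text text out) := by unfold Spec_process_tags_text; infer_instance

-- ===== CLAIM =====
def Claim_equal_process_tags_text : Prop := ∀ (text : String), Dom_process_tags_text text → Spec_process_tags_text text (process_tags_text text)

-- ===== LEMMAS AND PROOFS =====

-- split on single comma, recursive form, with a prefix accumulator
def split1 (pre : List Char) : List Char → List (List Char)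
  | [] => [pre]
  | c :: rest => if c = ',' then pre :: split1 [] rest else split1 (pre ++ [c]) rest

-- append step used after fusing the filter into the fold
def pvG (r t : List Char) : List Char := if r = [] then t else r ++ ' ' :: t

theorem go_eq_split1 (fuel : Nat) :
    ∀ (l cur : List Char) (accs : List (List Char)), l.length < fuel →
      PySem.Chars.splitOn.go [','] fuel l cur accs = accs.reverse ++ split1 cur.reverse l := by
  induction fuel with
  | zero => intro l cur accs h; omega
  | succ n ih =>
    intro l cur accs h
    cases l with
    | nil => simp [PySem.Chars.splitOn.go, split1]
    | cons c rest =>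
      rw [PySem.Chars.splitOn.go]
      by_cases hc : c = ','
      · subst hc
        rw [if_pos (by simp [List.isPrefixOf])]
        have hd : List.drop [','].length (',' :: rest) = rest := rfl
        rw [hd, ih rest [] (cur.reverse :: accs) (by simpa using Nat.lt_of_succ_lt_succ h)]
        simp [split1]
      · rw [if_neg (by simp only [List.isPrefixOf, Bool.and_eq_true, beq_iff_eq,
            List.isPrefixOf]; exact fun e => hc e.1.symm)]
        rw [ih rest (c :: cur) accs (by simpa using Nat.lt_of_succ_lt_succ h)]
        simp [split1, hc]

theorem splitOn_eq_split1 (cs : List Char) :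
    PySem.Chars.splitOn cs [','] = split1 [] cs := by
  unfold PySem.Chars.splitOn
  rw [go_eq_split1 (cs.length + 1) cs [] [] (by omega)]
  simp

theorem fold_loop (cs : List Char) :
    ∀ (res cur : List Char),
      ((cs ++ [',']).foldl pvStep (res, cur)).1 = (split1 cur cs).foldl pvFlush res := by
  induction cs with
  | nil => intro res cur; simp [pvStep, split1, pvFlush]
  | cons c rest ih =>
    intro res cur
    by_cases hc : c = ','
    · subst hc
      show (List.foldl pvStep (pvStep (res, cur) ',') (rest ++ [','])).1 = _
      rw [show pvStep (res, cur) ',' = (pvFlush res cur, []) from by simp [pvStep]]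
      rw [ih (pvFlush res cur) []]
      simp [split1]
    · show (List.foldl pvStep (pvStep (res, cur) c) (rest ++ [','])).1 = _
      rw [show pvStep (res, cur) c = (res, cur ++ [c]) from by simp [pvStep, hc]]
      rw [ih res (cur ++ [c])]
      simp [split1, hc]

theorem foldFlush_eq (pieces : List (List Char)) :
    ∀ (res : List Char),
      pieces.foldl pvFlush res
        = ((pieces.map PySem.Chars.strip).filter (fun t => 1 < t.length)).foldl pvG res := by
  induction pieces with
  | nil => intro res; rfl
  | cons p rest ih =>
    intro res
    by_cases hl : 1 < (PySem.Chars.strip p).length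
    · simp only [List.foldl_cons, List.map_cons, List.filter_cons, decide_eq_true hl, if_true]
      rw [ih]
      congr 1
      simp [pvFlush, pvG, hl]
    · simp only [List.foldl_cons, List.map_cons, List.filter_cons,
        decide_eq_false hl, Bool.false_eq_true, if_false]
      rw [ih]
      congr 1
      simp [pvFlush, hl]

theorem foldG_ne (ts : List (List Char)) :
    ∀ (r : List Char), r ≠ [] → ts.foldl pvG r = r ++ ts.flatMap (fun t => ' ' :: t) := by
  induction ts with
  | nil => intro r _; simp
  | cons t rest ih =>
    intro r hr
    simp only [List.foldl_cons, pvG, if_neg hr]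
    rw [ih (r ++ ' ' :: t) (by simp)]
    simp

-- intercalate with a one-character separator, in flatMap form
theorem intercalate_cons_char (t : List Char) (rest : List (List Char)) :
    List.intercalate [' '] (t :: rest) = t ++ rest.flatMap (fun u => ' ' :: u) := by
  induction rest generalizing t with
  | nil => simp [List.intercalate]
  | cons u ru ih =>
    have h2 := ih u
    simp [List.intercalate, List.intersperse] at h2 ⊢
    simp [h2]

theorem foldG_nil (ts : List (List Char)) (h : ∀ t ∈ ts, t ≠ []) :
    ts.foldl pvG [] = List.intercalate [' '] ts := by
  cases ts with
  | nil => simp [List.intercalate]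
  | cons t rest =>
    show List.foldl pvG (pvG [] t) rest = _
    rw [show pvG [] t = t from by simp [pvG]]
    rw [foldG_ne rest t (h t List.mem_cons_self), intercalate_cons_char]

theorem split1_no_comma (cs : List Char) :
    ∀ (pre : List Char), ',' ∉ cs → split1 pre cs = [pre ++ cs] := by
  induction cs with
  | nil => intro pre _; simp [split1]
  | cons c rest ih =>
    intro pre h
    have hc : ¬ c = ',' := fun e => h (e ▸ List.mem_cons_self)
    rw [split1, if_neg hc, ih (pre ++ [c]) (fun hm => h (List.mem_cons_of_mem _ hm))]
    simp

theorem mem_dropWhile_of_mem {α : Type} (p : α → Bool) (c : α) (hp : p c = false) :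
    ∀ (l : List α), c ∈ l → c ∈ l.dropWhile p := by
  intro l
  induction l with
  | nil => intro hc; cases hc
  | cons a l ih =>
    intro hc
    rw [List.dropWhile_cons]
    by_cases ha : p a = true
    · rw [if_pos ha]
      cases List.mem_cons.mp hc with
      | inl he => exact absurd (he ▸ ha) (by simp [hp])
      | inr hm => exact ih hm
    · rw [if_neg ha]; exact hc

theorem mem_strip_of_not_space (c : Char) (cs : List Char) (hc : c ∈ cs)
    (hs : PySem.Chars.isspace c = false) : c ∈ PySem.Chars.strip cs := by
  unfold PySem.Chars.strip PySem.Chars.rstrip PySem.Chars.lstrip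
  rw [List.mem_reverse]
  exact mem_dropWhile_of_mem _ c hs _
    (by rw [List.mem_reverse]; exact mem_dropWhile_of_mem _ c hs cs hc)

-- a stripped tag of length > 1 is in particular nonempty, so A's first filter is redundant
theorem tags_eq (L : List String) :
    ((L.filter (fun tag => PySem.Str.strip tag ≠ "")).map
        (fun tag => PySem.Str.strip tag)).filter (fun tag => 1 < PySem.Str.len tag)
      = (L.map (fun p => PySem.Str.strip p)).filter (fun t => 1 < PySem.Str.len t) := by
  induction L with
  | nil => rfl
  | cons t L ih =>
    by_cases h : PySem.Str.strip t = ""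
    · have hlen : ¬ ((1:Int) < PySem.Str.len (PySem.Str.strip t)) := by
        rw [h]; decide
      simp only [List.filter_cons, List.map_cons, ne_eq, h, not_true_eq_false, decide_false,
        Bool.false_eq_true, if_false, ih]
      rw [if_neg (by decide)]
    · simp only [List.filter_cons, List.map_cons, ne_eq, h, not_false_eq_true, decide_true,
        if_true, ih]

theorem split_getD (text : String) :
    (PySem.Str.split? text ",").getD [] =
      (PySem.Chars.splitOn text.toList [',']).map String.ofList := by
  simp [PySem.Str.split?, PySem.Chars.split?]

-- push A's String-level strip/filter down to the character lists
theorem tags_map (L : List (List Char)) :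
    ((L.map String.ofList).map (fun s => PySem.Str.strip s)).filter
        (fun s => 1 < PySem.Str.len s)
      = (((L.map PySem.Chars.strip).filter (fun t => 1 < t.length)).map String.ofList) := by
  induction L with
  | nil => rfl
  | cons p L ih =>
    have hlen : PySem.Str.len (PySem.Str.strip (String.ofList p))
        = ((PySem.Chars.strip p).length : Int) := by
      simp [PySem.Str.len, PySem.Str.strip]
    by_cases hl : 1 < (PySem.Chars.strip p).length
    · simp only [List.map_cons, List.filter_cons, hlen, decide_eq_true hl,
        decide_eq_true (by exact_mod_cast hl : (1:Int) < ((PySem.Chars.strip p).length : Int)),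
        if_true, ih]
      simp [PySem.Str.strip]
    · simp only [List.map_cons, List.filter_cons, hlen,
        decide_eq_false hl,
        decide_eq_false (by exact_mod_cast hl : ¬ (1:Int) < ((PySem.Chars.strip p).length : Int)),
        Bool.false_eq_true, if_false, ih]

theorem join_ofList (keep : List (List Char)) :
    PySem.Str.join " " (keep.map String.ofList) = String.ofList (List.intercalate [' '] keep) := by
  simp [PySem.Str.join, PySem.Chars.join, List.map_map, Function.comp_def]

theorem comma_mem_of_isIn (text : String) (h : PySem.Str.isIn "," text = true) :
    ',' ∈ text.toList :=
  (((PySem.Str.isIn_iff_infix "," text).mp h).subset (by simp))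

theorem comma_infix_of_mem (l : List Char) (h : ',' ∈ l) : [','] <:+: l := by
  obtain ⟨s, u, rfl⟩ := List.append_of_mem h
  exact ⟨s, u, by simp⟩

-- ===== VERDICT =====
theorem process_tags_text_spec : Claim_equal_process_tags_text := by
  intro text _
  unfold Spec_process_tags_text
  simp only [process_tags_text, process_tags_text_alt]
  rw [fold_loop]
  by_cases hin : PySem.Str.isIn "," text = true
  · -- comma branch
    have hmem : ',' ∈ text.toList := comma_mem_of_isIn text hin
    have hstrip : ¬ (PySem.Str.strip text = "") := by
      intro h
      have hm := mem_strip_of_not_space ',' text.toList hmem (by decide)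
      have h2 := congrArg String.toList h
      rw [PySem.Str.toList_strip] at h2
      simp only [h2] at hm
      cases hm
    rw [if_neg hstrip, if_pos hin, split_getD, tags_eq, tags_map, splitOn_eq_split1,
      foldFlush_eq]
    cases hkeep : ((split1 [] text.toList).map PySem.Chars.strip).filter
        (fun t => 1 < t.length) with
    | nil => simp
    | cons t ts =>
      have hall : ∀ u ∈ t :: ts, u ≠ [] := by
        intro u hu he
        have := List.of_mem_filter (hkeep ▸ hu :
          u ∈ ((split1 [] text.toList).map PySem.Chars.strip).filter (fun t => 1 < t.length))
        rw [he] at this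
        simp at this
      rw [foldG_nil _ hall, intercalate_cons_char]
      have htne : t ≠ [] := hall t List.mem_cons_self
      rw [if_pos (by simp : (t :: ts).map String.ofList ≠ [])]
      rw [if_neg (fun h => htne (List.append_eq_nil_iff.mp h).1)]
      rw [join_ofList, intercalate_cons_char]
  · -- no comma: the whole text is the single token
    have hnc : ',' ∉ text.toList := fun hm => hin ((PySem.Str.isIn_iff_infix "," text).mpr
      (comma_infix_of_mem _ hm))
    rw [split1_no_comma text.toList [] hnc]
    simp only [List.foldl_cons, List.foldl_nil, List.nil_append]
    have hlen : PySem.Str.len (PySem.Str.strip text)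
        = ((PySem.Chars.strip text.toList).length : Int) := by
      simp [PySem.Str.len, PySem.Str.strip]
    by_cases hstrip : PySem.Str.strip text = ""
    · rw [if_pos hstrip]
      have h2 := congrArg String.toList hstrip
      rw [PySem.Str.toList_strip] at h2
      simp only [String.toList_empty] at h2
      simp [pvFlush, h2]
    · rw [if_neg hstrip, if_neg hin]
      by_cases hl : 1 < (PySem.Chars.strip text.toList).length
      · rw [if_pos (by rw [hlen]; exact_mod_cast hl)]
        rw [show pvFlush [] text.toList = PySem.Chars.strip text.toList from by
          simp [pvFlush, hl]]
        rw [if_neg (by intro h; rw [h] at hl; simp at hl)]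
        rfl
      · rw [if_neg (by rw [hlen]; exact_mod_cast hl)]
        simp [pvFlush, hl]
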